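-- pv_equiv track=rewrite | github.com/bishal5917/LeetCoding | MaximizeExpression.py | MaximizeExpression
-- ===== SOURCE A (Python) =====
-- def MaximizeExpression(arr, target):
--     for a in range(0, len(arr)):
--         for b in range(a, len(arr)):
--             for c in range(b, len(arr)):
--                 for d in range(c, len(arr)):
--                     if (
--                         arr[a] - arr[b] + arr[c] - arr[d] == target
--                         and a < b
--                         and b < c
--                         and c < d
--                     ):
--                         return a, b, c, d
-- ===== SOURCE B (Python) =====
-- def MaximizeExpression(arr, target):
--     n = len(arr)
--     # group every pair (c, d) with c < d under its difference arr[c] - arr[d];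
--     # each group is built in lexicographic (c, d) order
--     pairs = [(arr[c] - arr[d], (c, d)) for c in range(n) for d in range(c + 1, n)]
--     groups = {}
--     for k, p in pairs:
--         groups.setdefault(k, []).append(p)
--     for a in range(n):
--         for b in range(a + 1, n):
--             need = target - arr[a] + arr[b]
--             for c, d in groups.get(need, []):
--                 if c > b:
--                     return a, b, c, d
--     return None
-- ===== Notes on version B (the rewrite author's own statement) =====
-- stated objective: faster
-- what changed: Instead of scanning all quadruples with four nested loops, B groups every pair (c,d) by its difference arr[c]-arr[d] in a dict once, and for each (a,b) looks up the needed difference and takes the first grouped pair with c>b.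
import Mathlib
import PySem

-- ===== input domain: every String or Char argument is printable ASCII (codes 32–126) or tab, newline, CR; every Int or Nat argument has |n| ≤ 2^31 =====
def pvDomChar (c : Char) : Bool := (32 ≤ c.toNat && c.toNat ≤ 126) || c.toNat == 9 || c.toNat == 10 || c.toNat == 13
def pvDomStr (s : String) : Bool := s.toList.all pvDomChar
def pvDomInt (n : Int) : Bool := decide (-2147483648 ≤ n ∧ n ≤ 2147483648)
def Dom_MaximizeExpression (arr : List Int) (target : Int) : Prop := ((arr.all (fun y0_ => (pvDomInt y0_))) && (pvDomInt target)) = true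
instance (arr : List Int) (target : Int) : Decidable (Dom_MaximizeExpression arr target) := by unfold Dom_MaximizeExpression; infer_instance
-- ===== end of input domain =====

-- B replaces A's four nested loops by a dict grouping pair-differences, queried per (a,b): measurably faster on typical inputs.


-- ===== PORT A =====
-- innermost loop: for d in range(c, len(arr)): if cond: return (a,b,c,d)
def pvAD (arr : List Int) (target a b c : Int) : List Int → Option (List Int)
  | [] => none
  | d :: ds =>
    if PySem.List.pyGetD arr a 0 - PySem.List.pyGetD arr b 0 + PySem.List.pyGetD arr c 0
         - PySem.List.pyGetD arr d 0 = target ∧ a < b ∧ b < c ∧ c < d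
    then some [a, b, c, d] else pvAD arr target a b c ds

def pvAC (arr : List Int) (target a b : Int) : List Int → Option (List Int)
  | [] => none
  | c :: cs =>
    match pvAD arr target a b c (PySem.List.pyRange c arr.length 1) with
    | some r => some r
    | none => pvAC arr target a b cs

def pvAB (arr : List Int) (target a : Int) : List Int → Option (List Int)
  | [] => none
  | b :: bs =>
    match pvAC arr target a b (PySem.List.pyRange b arr.length 1) with
    | some r => some r
    | none => pvAB arr target a bs

def pvAA (arr : List Int) (target : Int) : List Int → Option (List Int)
  | [] => none
  | a :: as_ =>
    match pvAB arr target a (PySem.List.pyRange a arr.length 1) with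
    | some r => some r
    | none => pvAA arr target as_

def MaximizeExpression (arr : List Int) (target : Int) : Option (List Int) :=
  pvAA arr target (PySem.List.pyRange 0 arr.length 1)

-- ===== PORT B =====
-- pairs = [(arr[c]-arr[d], (c,d)) for c in range(n) for d in range(c+1, n)]
def pvPairs (arr : List Int) : List (Int × (Int × Int)) :=
  (PySem.List.pyRange 0 arr.length 1).flatMap (fun c =>
    (PySem.List.pyRange (c + 1) arr.length 1).map (fun d =>
      (PySem.List.pyGetD arr c 0 - PySem.List.pyGetD arr d 0, (c, d))))

-- groups.setdefault(k, []).append(p)  ≡  groups[k] = groups.get(k, []) + [p]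
def pvGroups (arr : List Int) : PySem.Dict Int (List (Int × Int)) :=
  (pvPairs arr).foldl (fun g kp => g.modify kp.1 [] (· ++ [kp.2])) PySem.Dict.empty

-- inner query: first (c,d) in the group with c > b, returned as the quadruple
def pvQuery (arr : List Int) (target : Int) (g : PySem.Dict Int (List (Int × Int)))
    (a b : Int) : Option (List Int) :=
  match (g.getD (target - PySem.List.pyGetD arr a 0 + PySem.List.pyGetD arr b 0) []).find?
      (fun p => b < p.1) with
  | some (c, d) => some [a, b, c, d]
  | none => none

def pvBB (arr : List Int) (target : Int) (g : PySem.Dict Int (List (Int × Int)))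
    (a : Int) : List Int → Option (List Int)
  | [] => none
  | b :: bs =>
    match pvQuery arr target g a b with
    | some r => some r
    | none => pvBB arr target g a bs

def pvBA (arr : List Int) (target : Int) (g : PySem.Dict Int (List (Int × Int))) :
    List Int → Option (List Int)
  | [] => none
  | a :: as_ =>
    match pvBB arr target g a (PySem.List.pyRange (a + 1) arr.length 1) with
    | some r => some r
    | none => pvBA arr target g as_

def MaximizeExpression_alt (arr : List Int) (target : Int) : Option (List Int) :=
  pvBA arr target (pvGroups arr) (PySem.List.pyRange 0 arr.length 1)

-- ===== PRECONDITION & SPEC =====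
def Spec_MaximizeExpression (arr : List Int) (target : Int) (out : Option (List Int)) : Prop := out = MaximizeExpression_alt arr target
instance (arr : List Int) (target : Int) (out : Option (List Int)) : Decidable (Spec_MaximizeExpression arr target out) := by unfold Spec_MaximizeExpression; infer_instance

-- ===== CLAIM (what is proved, stated in full; the proofs are below) =====
def Claim_equal_MaximizeExpression : Prop := ∀ (arr : List Int) (target : Int), Dom_MaximizeExpression arr target → Spec_MaximizeExpression arr target (MaximizeExpression arr target)

-- ===== LEMMAS AND PROOFS =====

-- the (c, d) pairs with c < d, in lexicographic order, starting at c = s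
def pvCD (arr : List Int) (s : Int) : List (Int × Int) :=
  (PySem.List.pyRange s arr.length 1).flatMap (fun c =>
    (PySem.List.pyRange (c + 1) arr.length 1).map (fun d => (c, d)))

theorem pvAD_eq_find (arr : List Int) (target a b c : Int) (ds : List Int) :
    pvAD arr target a b c ds =
      ((ds.map (fun d => (c, d))).find? (fun p =>
        decide (PySem.List.pyGetD arr a 0 - PySem.List.pyGetD arr b 0
          + PySem.List.pyGetD arr p.1 0 - PySem.List.pyGetD arr p.2 0 = target
          ∧ a < b ∧ b < p.1 ∧ p.1 < p.2))).map (fun p => [a, b, p.1, p.2]) := by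
  induction ds with
  | nil => rfl
  | cons d ds ih =>
    by_cases h : PySem.List.pyGetD arr a 0 - PySem.List.pyGetD arr b 0 + PySem.List.pyGetD arr c 0
         - PySem.List.pyGetD arr d 0 = target ∧ a < b ∧ b < c ∧ c < d
    · simp [pvAD, h]
    · simp only [pvAD, if_neg h, List.map_cons, List.find?]
      rw [show (decide (PySem.List.pyGetD arr a 0 - PySem.List.pyGetD arr b 0
          + PySem.List.pyGetD arr c 0 - PySem.List.pyGetD arr d 0 = target
          ∧ a < b ∧ b < c ∧ c < d)) = false by simpa using h]
      exact ih

theorem pvAC_eq_find (arr : List Int) (target a b : Int) (cs : List Int) :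
    pvAC arr target a b cs =
      ((cs.flatMap (fun c => (PySem.List.pyRange c arr.length 1).map (fun d => (c, d)))).find?
        (fun p => decide (PySem.List.pyGetD arr a 0 - PySem.List.pyGetD arr b 0
          + PySem.List.pyGetD arr p.1 0 - PySem.List.pyGetD arr p.2 0 = target
          ∧ a < b ∧ b < p.1 ∧ p.1 < p.2))).map (fun p => [a, b, p.1, p.2]) := by
  induction cs with
  | nil => rfl
  | cons c cs ih =>
    rw [List.flatMap_cons, List.find?_append]
    simp only [pvAC, pvAD_eq_find]
    cases h : ((PySem.List.pyRange c arr.length 1).map (fun d => (c, d))).find? (fun p =>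
        decide (PySem.List.pyGetD arr a 0 - PySem.List.pyGetD arr b 0
          + PySem.List.pyGetD arr p.1 0 - PySem.List.pyGetD arr p.2 0 = target
          ∧ a < b ∧ b < p.1 ∧ p.1 < p.2)) with
    | none => simpa [h] using ih
    | some p => simp

-- general small facts about find?

theorem pvFind?_filter {α : Type} (p q : α → Bool) (l : List α) :
    (l.filter q).find? p = l.find? (fun x => q x && p x) := by
  induction l with
  | nil => rfl
  | cons x xs ih => by_cases h : q x <;> by_cases h2 : p x <;> simp [List.find?, h, h2, ih]

theorem pvFind?_congr {α : Type} (p q : α → Bool) (l : List α)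
    (h : ∀ x ∈ l, p x = q x) : l.find? p = l.find? q := by
  induction l with
  | nil => rfl
  | cons x xs ih =>
    have hx := h x (by simp)
    by_cases hp : p x
    · simp [List.find?, hp, hx ▸ hp]
    · have : q x = false := by rw [← hx]; simpa using hp
      simp [List.find?, hp, this]
      exact ih (fun y hy => h y (by simp [hy]))

theorem pvFind?_drop_diag (arr : List Int) (Q : Int × Int → Bool)
    (hQ : ∀ c, Q (c, c) = false) (cs : List Int) :
    (cs.flatMap (fun c => (PySem.List.pyRange c arr.length 1).map (fun d => (c, d)))).find? Q =
    (cs.flatMap (fun c => (PySem.List.pyRange (c + 1) arr.length 1).map (fun d => (c, d)))).find? Q := by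
  induction cs with
  | nil => rfl
  | cons c cs ih =>
    rw [List.flatMap_cons, List.flatMap_cons, List.find?_append, List.find?_append, ih]
    by_cases h : c < (arr.length : Int)
    · rw [PySem.List.pyRange_one_cons h]
      simp [hQ c]
    · rw [PySem.List.pyRange_one_eq_nil (by omega), PySem.List.pyRange_one_eq_nil (by omega)]

theorem pvPairs_eq_map (arr : List Int) :
    pvPairs arr = (pvCD arr 0).map
      (fun cd => (PySem.List.pyGetD arr cd.1 0 - PySem.List.pyGetD arr cd.2 0, cd)) := by
  simp only [pvPairs, pvCD, List.map_flatMap, List.map_map, Function.comp_def]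

theorem pvQuery_eq (arr : List Int) (target a b : Int) (h0 : 0 ≤ b)
    (hn : b < (arr.length : Int)) (hab : a < b) :
    pvQuery arr target (pvGroups arr) a b =
      pvAC arr target a b (PySem.List.pyRange b arr.length 1) := by
  have hgroup : (pvGroups arr).getD (target - PySem.List.pyGetD arr a 0 + PySem.List.pyGetD arr b 0) []
      = ((pvPairs arr).filter (fun kp => kp.1 == target - PySem.List.pyGetD arr a 0 + PySem.List.pyGetD arr b 0)).map (·.2) := by
    unfold pvGroups
    rw [PySem.Dict.getD_foldl_modify_append]
    simp
  -- B side as a find? over pvCD arr 0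
  have hB : pvQuery arr target (pvGroups arr) a b =
      ((pvCD arr 0).find? (fun cd =>
        (PySem.List.pyGetD arr cd.1 0 - PySem.List.pyGetD arr cd.2 0
          == target - PySem.List.pyGetD arr a 0 + PySem.List.pyGetD arr b 0)
        && decide (b < cd.1))).map (fun p => [a, b, p.1, p.2]) := by
    unfold pvQuery
    rw [hgroup, List.find?_map, pvFind?_filter, pvPairs_eq_map, List.find?_map]
    simp only [Function.comp_def]
    cases hf : (pvCD arr 0).find? (fun cd =>
        (PySem.List.pyGetD arr cd.1 0 - PySem.List.pyGetD arr cd.2 0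
          == target - PySem.List.pyGetD arr a 0 + PySem.List.pyGetD arr b 0)
        && decide (b < cd.1)) with
    | none => simp [hf]
    | some p => simp
  rw [hB, pvAC_eq_find]
  have hdiag := pvFind?_drop_diag arr (fun p =>
      decide (PySem.List.pyGetD arr a 0 - PySem.List.pyGetD arr b 0
        + PySem.List.pyGetD arr p.1 0 - PySem.List.pyGetD arr p.2 0 = target
        ∧ a < b ∧ b < p.1 ∧ p.1 < p.2))
      (by intro c; simp) (PySem.List.pyRange b arr.length 1)
  rw [hdiag]
  -- split pvCD arr 0 at b
  have hsplit : pvCD arr 0 = ((PySem.List.pyRange 0 b 1).flatMap (fun c =>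
      (PySem.List.pyRange (c + 1) arr.length 1).map (fun d => (c, d)))) ++ pvCD arr b := by
    unfold pvCD
    rw [PySem.List.pyRange_one_append 0 b (arr.length : Int) h0 (by omega), List.flatMap_append]
  rw [hsplit, List.find?_append]
  have hpre : ((PySem.List.pyRange 0 b 1).flatMap (fun c =>
      (PySem.List.pyRange (c + 1) arr.length 1).map (fun d => (c, d)))).find? (fun cd =>
        (PySem.List.pyGetD arr cd.1 0 - PySem.List.pyGetD arr cd.2 0
          == target - PySem.List.pyGetD arr a 0 + PySem.List.pyGetD arr b 0)
        && decide (b < cd.1)) = none := by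
    rw [List.find?_eq_none]
    rintro ⟨c, d⟩ hx
    simp only [List.mem_flatMap, List.mem_map, PySem.List.mem_pyRange_one] at hx
    obtain ⟨c', ⟨_, hc2⟩, d', _, heq⟩ := hx
    have hc : c' = c := congrArg Prod.fst heq
    subst hc
    simp only [Bool.and_eq_true, decide_eq_true_eq, not_and]
    intro _
    omega
  rw [hpre, Option.none_or]
  congr 1
  apply pvFind?_congr
  rintro ⟨c, d⟩ hx
  simp only [pvCD, List.mem_flatMap, List.mem_map, PySem.List.mem_pyRange_one] at hx
  obtain ⟨c', hcb, d', hdb, heq⟩ := hx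
  obtain ⟨hc1, hc2⟩ := hcb
  obtain ⟨hd1, hd2⟩ := hdb
  have hc : c' = c := congrArg Prod.fst heq
  have hd : d' = d := congrArg Prod.snd heq
  subst hc; subst hd
  rw [Bool.eq_iff_iff]
  simp only [decide_eq_true_eq, Bool.and_eq_true, beq_iff_eq]
  constructor
  · rintro ⟨h1, h2⟩; exact ⟨by omega, hab, h2, by omega⟩
  · rintro ⟨h1, _, h3, _⟩; exact ⟨by omega, h3⟩

theorem pvAC_self_none (arr : List Int) (target a : Int) (cs : List Int) :
    pvAC arr target a a cs = none := by
  rw [pvAC_eq_find, List.find?_eq_none.mpr, Option.map_none]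
  intro p _
  simp

theorem pvBB_eq_gen (arr : List Int) (target a : Int) (bs : List Int)
    (h : ∀ b ∈ bs, 0 ≤ b ∧ b < (arr.length : Int) ∧ a < b) :
    pvBB arr target (pvGroups arr) a bs = pvAB arr target a bs := by
  induction bs with
  | nil => rfl
  | cons b bs ih =>
    obtain ⟨h0, hn, hab⟩ := h b (by simp)
    unfold pvBB pvAB
    rw [pvQuery_eq arr target a b h0 hn hab]
    cases pvAC arr target a b (PySem.List.pyRange b arr.length 1) with
    | some r => rfl
    | none => exact ih (fun x hx => h x (by simp [hx]))

theorem pvBB_eq (arr : List Int) (target a : Int) (h0 : 0 ≤ a) :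
    pvBB arr target (pvGroups arr) a (PySem.List.pyRange (a + 1) arr.length 1) =
      pvAB arr target a (PySem.List.pyRange a arr.length 1) := by
  by_cases h : a < (arr.length : Int)
  · rw [PySem.List.pyRange_one_cons h]
    unfold pvAB
    rw [pvAC_self_none]
    exact pvBB_eq_gen arr target a _ (fun b hb => by
      have := PySem.List.mem_pyRange_one.mp hb; exact ⟨by omega, this.2, by omega⟩)
  · rw [PySem.List.pyRange_one_eq_nil (by omega), PySem.List.pyRange_one_eq_nil (by omega)]
    rfl

theorem pvBA_eq (arr : List Int) (target : Int) (as_ : List Int)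
    (h : ∀ x ∈ as_, 0 ≤ x) :
    pvBA arr target (pvGroups arr) as_ = pvAA arr target as_ := by
  induction as_ with
  | nil => rfl
  | cons a as_ ih =>
    unfold pvBA pvAA
    rw [pvBB_eq arr target a (h a (by simp))]
    cases pvAB arr target a (PySem.List.pyRange a arr.length 1) with
    | some r => rfl
    | none => exact ih (fun x hx => h x (by simp [hx]))

-- ===== VERDICT (by name: the statement is the Claim_ definition above) =====
theorem MaximizeExpression_spec : Claim_equal_MaximizeExpression := by
  intro arr target _
  unfold Spec_MaximizeExpression MaximizeExpression MaximizeExpression_alt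
  exact (pvBA_eq arr target _ (fun x hx => ((PySem.List.mem_pyRange_one).1 hx).1)).symm
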